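-- pv_equiv track=rewrite | github.com/jeremyagray/django-loader | loader/loader.py | _keys_are_indices
-- ===== SOURCE A (Python) =====
-- def _keys_are_indices(d):
--     """Determine if the keys of a dict are list indices."""
--     # All integers?
--     keys = []
--     for k in d.keys():
--         try:
--             keys.append(int(k))
--         except ValueError:
--             return False
--
--     keys = sorted(keys)
--
--     # Zero start?
--     if min(keys) != 0:
--         return False
--
--     # Consecutive?
--     if keys != list(range(0, max(keys) + 1)):
--         return False
--
--     return True
-- ===== SOURCE B (Python) =====
-- def _keys_are_indices(d):
--     """Determine if the keys of a dict are list indices."""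
--     vals = set()
--     n = 0
--     for k in d.keys():
--         try:
--             vals.add(int(k))
--         except ValueError:
--             return False
--         n += 1
--     # min() raises ValueError on an empty dict, exactly as the original does.
--     return min(vals) == 0 and max(vals) == n - 1 and len(vals) == n
-- ===== Notes on version B (the rewrite author's own statement) =====
-- stated objective: simpler
-- what changed: Replaces A's sort-then-compare-to-list(range(max+1)) check by a single collecting pass validated arithmetically: min == 0, max == count - 1, and all converted keys distinct (set size == count).
import Mathlib
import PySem

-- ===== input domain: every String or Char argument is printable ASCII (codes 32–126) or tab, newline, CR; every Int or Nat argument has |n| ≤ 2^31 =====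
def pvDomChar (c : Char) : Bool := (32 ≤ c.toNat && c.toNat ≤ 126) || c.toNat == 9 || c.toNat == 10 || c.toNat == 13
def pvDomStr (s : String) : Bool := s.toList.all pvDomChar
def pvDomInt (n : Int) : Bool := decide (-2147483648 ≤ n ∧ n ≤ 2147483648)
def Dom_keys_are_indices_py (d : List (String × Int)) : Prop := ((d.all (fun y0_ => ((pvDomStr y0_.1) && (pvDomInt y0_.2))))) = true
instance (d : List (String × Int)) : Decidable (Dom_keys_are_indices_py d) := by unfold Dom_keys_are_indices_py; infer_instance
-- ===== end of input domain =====

-- B replaces A's sort-and-compare-to-range check by a single arithmetic pass (min = 0, max = count-1,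
-- all distinct); equivalence of the return values is proved on every non-empty dict (A raises on {}).

-- ===== PORT A =====
-- the 'keys.append(int(k))' loop; none = the early 'return False' on a ValueError from int(k)
def pvIntKeysA : List String → Option (List Int)
  | [] => some []
  | k :: rest =>
    match PySem.Int.ofStr? k with
    | none => none
    | some v => (pvIntKeysA rest).map (fun l => v :: l)

def keys_are_indices_py (d : List (String × Int)) : Bool :=
  match pvIntKeysA ((PySem.Dict.ofList d).keys) with
  | none => false
  | some keys0 =>
    let keys := PySem.List.sorted keys0 (fun x => x)
    match PySem.List.min? keys (fun x => x), PySem.List.max? keys (fun x => x) with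
    | some mn, some mx =>
      if mn ≠ 0 then false
      else if keys ≠ PySem.List.pyRange 0 (mx + 1) then false
      else true
    | _, _ => false   -- empty dict: the Python raises ValueError (excluded by Pre_)

-- ===== PORT B =====
-- the single pass of Source B: build the set of int-converted keys and count them
def pvCollectB : List String → PySem.Set Int → Int → Option (PySem.Set Int × Int)
  | [], vals, n => some (vals, n)
  | k :: rest, vals, n =>
    match PySem.Int.ofStr? k with
    | none => none
    | some v => pvCollectB rest (PySem.Set.add vals v) (n + 1)

def keys_are_indices_py_alt (d : List (String × Int)) : Bool :=
  match pvCollectB ((PySem.Dict.ofList d).keys) PySem.Set.empty 0 with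
  | none => false
  | some r =>
    match PySem.List.min? r.1 (fun x => x) with
    | none => false   -- empty dict: the Python raises ValueError (excluded by Pre_)
    | some mn =>
      match PySem.List.max? r.1 (fun x => x) with
      | none => false
      | some mx => mn == 0 && mx == r.2 - 1 && PySem.Set.len r.1 == r.2

-- ===== PRECONDITION & SPEC =====
-- Pre_ excludes only the empty dict, on which A raises ValueError (min() of an empty sequence).
def Pre_keys_are_indices_py (d : List (String × Int)) : Prop := d ≠ []
instance (d : List (String × Int)) : Decidable (Pre_keys_are_indices_py d) := by unfold Pre_keys_are_indices_py; infer_instance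
def pvWitness_keys_are_indices_py : (List (String × Int)) := [("0", 0)]

def Spec_keys_are_indices_py (d : List (String × Int)) (out : Bool) : Prop := out = keys_are_indices_py_alt d
instance (d : List (String × Int)) (out : Bool) : Decidable (Spec_keys_are_indices_py d out) := by unfold Spec_keys_are_indices_py; infer_instance

-- ===== CLAIM (what is proved, stated in full; the proofs are below) =====
def Claim_equal_keys_are_indices_py : Prop := ∀ (d : List (String × Int)), Dom_keys_are_indices_py d → Pre_keys_are_indices_py d → Spec_keys_are_indices_py d (keys_are_indices_py d)

-- ===== LEMMAS AND PROOFS =====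

-- B's collecting loop is A's converting loop plus a Set.add fold and a count
theorem pvCollectB_eq (ks : List String) (s : PySem.Set Int) (n : Int) :
    pvCollectB ks s n = (pvIntKeysA ks).map (fun l => (l.foldl PySem.Set.add s, n + (l.length : Int))) := by
  induction ks generalizing s n with
  | nil => simp [pvCollectB, pvIntKeysA]
  | cons k rest ih =>
    simp only [pvCollectB, pvIntKeysA]
    cases PySem.Int.ofStr? k with
    | none => rfl
    | some v =>
      dsimp only
      rw [ih]
      cases pvIntKeysA rest with
      | none => rfl
      | some l =>
        simp only [Option.map_some, List.foldl_cons, List.length_cons]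
        congr 1
        push_cast
        ring_nf

theorem pvIntKeysA_length (ks : List String) (l : List Int) (h : pvIntKeysA ks = some l) :
    l.length = ks.length := by
  induction ks generalizing l with
  | nil => simp [pvIntKeysA] at h; simp [← h]
  | cons k rest ih =>
    simp only [pvIntKeysA] at h
    cases hk : PySem.Int.ofStr? k with
    | none => rw [hk] at h; exact absurd h (by simp)
    | some v =>
      rw [hk] at h
      cases hr : pvIntKeysA rest with
      | none => rw [hr] at h; exact absurd h (by simp)
      | some l' =>
        rw [hr] at h
        simp only [Option.map_some, Option.some.injEq] at h
        simp [← h, ih l' hr]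

theorem pvMin_eq (xs ys : List Int) (h : ∀ x, x ∈ xs ↔ x ∈ ys) :
    PySem.List.min? xs (fun x => x) = PySem.List.min? ys (fun x => x) := by
  cases hx : PySem.List.min? xs (fun x => x) with
  | none =>
    cases hy : PySem.List.min? ys (fun x => x) with
    | none => rfl
    | some m =>
      rw [PySem.List.min?_eq_none_iff] at hx
      exact absurd ((h m).mpr (PySem.List.min?_mem hy)) (by simp [hx])
  | some m =>
    cases hy : PySem.List.min? ys (fun x => x) with
    | none =>
      rw [PySem.List.min?_eq_none_iff] at hy
      exact absurd ((h m).mp (PySem.List.min?_mem hx)) (by simp [hy])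
    | some m' =>
      have h1 : m ≤ m' := PySem.List.min?_isMin hx m' ((h m').mpr (PySem.List.min?_mem hy))
      have h2 : m' ≤ m := PySem.List.min?_isMin hy m ((h m).mp (PySem.List.min?_mem hx))
      rw [le_antisymm h1 h2]

theorem pvMax_eq (xs ys : List Int) (h : ∀ x, x ∈ xs ↔ x ∈ ys) :
    PySem.List.max? xs (fun x => x) = PySem.List.max? ys (fun x => x) := by
  cases hx : PySem.List.max? xs (fun x => x) with
  | none =>
    cases hy : PySem.List.max? ys (fun x => x) with
    | none => rfl
    | some m =>
      rw [PySem.List.max?_eq_none_iff] at hx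
      exact absurd ((h m).mpr (PySem.List.max?_mem hy)) (by simp [hx])
  | some m =>
    cases hy : PySem.List.max? ys (fun x => x) with
    | none =>
      rw [PySem.List.max?_eq_none_iff] at hy
      exact absurd ((h m).mp (PySem.List.max?_mem hx)) (by simp [hy])
    | some m' =>
      have h1 : m' ≤ m := PySem.List.max?_isMax hx m' ((h m').mpr (PySem.List.max?_mem hy))
      have h2 : m ≤ m' := PySem.List.max?_isMax hy m ((h m).mp (PySem.List.max?_mem hx))
      rw [le_antisymm h2 h1]

theorem pvFoldlAdd_sublist (l : List Int) : ∀ s : List Int, ∃ t, List.foldl PySem.Set.add s l = s ++ t ∧ t.Sublist l := by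
  induction l with
  | nil => intro s; exact ⟨[], by simp⟩
  | cons x rest ih =>
    intro s
    by_cases hc : x ∈ s
    · obtain ⟨t, ht, hs⟩ := ih s
      refine ⟨t, ?_, hs.cons x⟩
      simpa [PySem.Set.add, hc] using ht
    · obtain ⟨t, ht, hs⟩ := ih (s ++ [x])
      refine ⟨x :: t, ?_, hs.cons₂ x⟩
      rw [List.foldl_cons, show PySem.Set.add s x = s ++ [x] from by simp [PySem.Set.add, hc], ht]
      simp

theorem pvNodup_of_ofList_length (l : List Int) (h : (PySem.Set.ofList l).length = l.length) : l.Nodup := by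
  obtain ⟨t, ht, hs⟩ := pvFoldlAdd_sublist l []
  rw [PySem.Set.ofList_eq_foldl, ht] at h
  simp only [List.nil_append] at h ⊢
  have : t = l := hs.eq_of_length (by simpa using h)
  have h2 := PySem.Set.nodup_ofList l
  rw [PySem.Set.ofList_eq_foldl, ht] at h2
  simpa [this] using h2

-- ===== VERDICT (by name: the statement is the Claim_ definition above) =====
theorem keys_are_indices_py_spec : Claim_equal_keys_are_indices_py := by
  intro d _ hpre
  unfold Spec_keys_are_indices_py
  have hkeys : (PySem.Dict.ofList d).keys = PySem.Set.ofList (d.map Prod.fst) := by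
    show (List.foldl (fun d x => d.insert x.1 x.2) PySem.Dict.empty d).keys = _
    rw [show (fun (d : PySem.Dict String Int) (x : String × Int) => d.insert x.1 x.2) = (fun d x => d.insert ((fun y => y.1) x) ((fun (_ : PySem.Dict String Int) (y : String × Int) => y.2) d x)) from rfl,
       PySem.Dict.keys_foldl_insert_key]
    simp [PySem.Dict.keys_empty, PySem.Set.update, PySem.Set.ofList_eq_foldl]
  have hk : (PySem.Dict.ofList d).keys ≠ [] := by
    obtain ⟨p, rest, rfl⟩ : ∃ p rest, d = p :: rest := by
      cases d with
      | nil => exact absurd rfl hpre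
      | cons p rest => exact ⟨p, rest, rfl⟩
    rw [hkeys]
    intro hnil
    have hm : p.1 ∈ PySem.Set.ofList ((p :: rest).map Prod.fst) := by
      rw [PySem.Set.mem_ofList]; simp
    rw [hnil] at hm
    simp at hm
  simp only [keys_are_indices_py, keys_are_indices_py_alt, pvCollectB_eq]
  revert hk
  generalize (PySem.Dict.ofList d).keys = ks
  intro hk
  cases hA : pvIntKeysA ks with
  | none => rfl
  | some keys0 =>
    simp only [Option.map_some]
    have hlen : keys0.length = ks.length := pvIntKeysA_length ks keys0 hA
    have hk0 : keys0 ≠ [] := by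
      intro h0; rw [h0] at hlen; exact hk (List.eq_nil_of_length_eq_zero hlen.symm)
    have hvals : List.foldl PySem.Set.add PySem.Set.empty keys0 = PySem.Set.ofList keys0 :=
      (PySem.Set.ofList_eq_foldl keys0).symm
    rw [hvals]
    have hmem : ∀ x, x ∈ PySem.List.sorted keys0 (fun x => x) ↔ x ∈ PySem.Set.ofList keys0 := by
      intro x
      rw [PySem.List.mem_sorted, PySem.Set.mem_ofList]
    have hminEq := pvMin_eq _ _ hmem
    have hmaxEq := pvMax_eq _ _ hmem
    have hsne : PySem.List.sorted keys0 (fun x => x) ≠ [] := by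
      intro h0
      have hl := PySem.List.length_sorted keys0 (fun x => x) false
      rw [h0] at hl
      exact hk0 (List.eq_nil_of_length_eq_zero hl.symm)
    cases hmin : PySem.List.min? (PySem.List.sorted keys0 (fun x => x)) (fun x => x) with
    | none => exact absurd ((PySem.List.min?_eq_none_iff _ _).mp hmin) hsne
    | some mn =>
    cases hmax : PySem.List.max? (PySem.List.sorted keys0 (fun x => x)) (fun x => x) with
    | none => exact absurd ((PySem.List.max?_eq_none_iff _ _).mp hmax) hsne
    | some mx =>
    rw [hmin] at hminEq; rw [hmax] at hmaxEq
    rw [← hminEq, ← hmaxEq]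
    dsimp only
    by_cases hmn : mn = 0
    · subst hmn
      have hmin0 : ∀ y ∈ PySem.List.sorted keys0 (fun x => x), (0:Int) ≤ y :=
        PySem.List.min?_isMin hmin
      have hmaxU : ∀ y ∈ PySem.List.sorted keys0 (fun x => x), y ≤ mx :=
        PySem.List.max?_isMax hmax
      have hmx0 : (0:Int) ≤ mx := hmin0 mx (PySem.List.max?_mem hmax)
      have key : (PySem.List.sorted keys0 (fun x => x) = PySem.List.pyRange 0 (mx + 1)) ↔
          (mx = (0 + (keys0.length : Int)) - 1 ∧ PySem.Set.len (PySem.Set.ofList keys0) = 0 + (keys0.length : Int)) := by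
        constructor
        · intro heq
          have hlen2 : keys0.length = (mx + 1 - 0).toNat := by
            rw [← PySem.List.length_sorted keys0 (fun x => x) false, heq,
              PySem.List.length_pyRange_one]
          have hlenInt : (keys0.length : Int) = mx + 1 := by omega
          have hnd : keys0.Nodup := by
            have hnr := PySem.List.nodup_pyRange_one 0 (mx + 1)
            rw [← heq] at hnr
            exact ((PySem.List.sorted_perm keys0 (fun x => x) false).nodup_iff).mp hnr
          constructor
          · omega
          · rw [PySem.Set.ofList_eq_self_of_nodup keys0 hnd]
            simp [PySem.Set.len]
        · rintro ⟨hmx, hlenS⟩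
          have hndL : (PySem.Set.ofList keys0).length = keys0.length := by
            simp only [PySem.Set.len] at hlenS; omega
          have hnd : keys0.Nodup := pvNodup_of_ofList_length keys0 hndL
          have hndS : (PySem.List.sorted keys0 (fun x => x)).Nodup :=
            ((PySem.List.sorted_perm keys0 (fun x => x) false).nodup_iff).mpr hnd
          have hsub : PySem.List.sorted keys0 (fun x => x) ⊆ PySem.List.pyRange 0 (mx + 1) := by
            intro x hx
            rw [PySem.List.mem_pyRange_one]
            refine ⟨hmin0 x hx, ?_⟩
            have := hmaxU x hx; omega
          have hsp := List.subperm_of_subset hndS hsub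
          have hlr : (PySem.List.pyRange 0 (mx + 1)).length = keys0.length := by
            rw [PySem.List.length_pyRange_one]; omega
          have hperm : (PySem.List.sorted keys0 (fun x => x)).Perm (PySem.List.pyRange 0 (mx + 1)) :=
            hsp.perm_of_length_le (by rw [hlr, PySem.List.length_sorted])
          have hpk : (PySem.List.pyRange 0 (mx + 1)).Perm keys0 :=
            hperm.symm.trans (PySem.List.sorted_perm keys0 (fun x => x) false)
          exact PySem.List.sorted_eq_of_perm_of_pairwise_lt keys0 _ (fun x => x) hpk
            (PySem.List.pairwise_lt_pyRange_one 0 (mx + 1))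
      by_cases hc : PySem.List.sorted keys0 (fun x => x) = PySem.List.pyRange 0 (mx + 1)
      · obtain ⟨h1, h2⟩ := key.mp hc
        simp only [PySem.Set.len] at h2
        simp [hc, h1]
        omega
      · by_cases h1 : mx = (keys0.length : Int) - 1
        · by_cases h2 : (PySem.Set.ofList keys0).length = keys0.length
          · exact absurd (key.mpr ⟨by omega, by simp only [PySem.Set.len]; omega⟩) hc
          · have hc0 : ¬ (PySem.List.sorted keys0 (fun x => x) = PySem.List.pyRange 0 ((keys0.length : Int))) := by
              intro he
              exact hc (by rw [show mx + 1 = ((keys0.length : Int)) from by omega]; exact he)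
            simp [PySem.Set.len, hc0, h1, h2]
        · simp [PySem.Set.len, hc, h1]
    · simp [hmn]
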